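-- pv_equiv track=rewrite | github.com/sunnytake/CodeAndDecode | 程序员面试指南/第五章-字符串问题/找到被指的新类型字符.py | pointNewChar
-- ===== SOURCE A (Python) =====
-- def pointNewChar(str, k):
--     if not str or k < 0 or k >= len(str):
--         return ""
--     upper_num = 0
--     for i in range(k-1, -1, -1):
--         if not str[i].isupper():
--             break
--         upper_num += 1
--
--     if upper_num & 1 == 1:
--         return str[k-1: k+1]
--     if str[k].isupper():
--         return str[k: k+2]
--     return str[k]
-- ===== SOURCE B (Python) =====
-- def pointNewChar(str, k):
--     if not str or k < 0 or k >= len(str):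
--         return ""
--     i = 0
--     while True:
--         if str[i].isupper():
--             if k <= i + 1:
--                 return str[i:i+2]
--             i += 2
--         else:
--             if k == i:
--                 return str[i]
--             i += 1
-- ===== Notes on version B (the rewrite author's own statement) =====
-- stated objective: alternative
-- what changed: A counts the uppercase run backwards from k-1 and decides by its parity which slice to return; B instead parses the string forward once into one- and two-character units (an uppercase char starts a two-char unit) and returns the unit whose range contains k.
import Mathlib
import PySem

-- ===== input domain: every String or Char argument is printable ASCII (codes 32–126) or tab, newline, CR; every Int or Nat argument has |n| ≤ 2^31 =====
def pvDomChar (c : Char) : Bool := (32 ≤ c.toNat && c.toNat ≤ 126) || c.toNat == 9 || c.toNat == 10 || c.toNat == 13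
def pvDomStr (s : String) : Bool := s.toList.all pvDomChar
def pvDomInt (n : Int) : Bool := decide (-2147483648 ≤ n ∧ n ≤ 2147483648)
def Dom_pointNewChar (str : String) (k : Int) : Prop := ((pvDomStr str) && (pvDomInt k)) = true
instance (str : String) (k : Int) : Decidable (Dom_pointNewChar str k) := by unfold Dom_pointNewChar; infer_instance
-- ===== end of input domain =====

-- B replaces A's backward uppercase-run parity count with a single forward left-to-right parse
-- into one- and two-character units, returning the unit that contains index k (objective: alternative).

-- ===== PORT A =====
-- A's backward counting loop 'for i in range(k-1,-1,-1): if not str[i].isupper(): break; upper_num += 1'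
-- as a foldl over the same range list with a (count, broken) state.
def pointNewChar (str : String) (k : Int) : String :=
  if str = "" ∨ k < 0 ∨ k ≥ PySem.Str.len str then ""
  else
    let st := (PySem.List.pyRange (k - 1) (-1) (-1)).foldl
      (fun (st : Int × Bool) i =>
        if st.2 then st
        else if ¬ ((PySem.Str.pyGet? str i).elim false PySem.Chars.isupper) then (st.1, true)
        else (st.1 + 1, st.2)) (0, false)
    let upper_num := st.1
    if PySem.Int.band upper_num 1 = 1 then
      PySem.Str.slice str (some (k - 1)) (some (k + 1))
    else if (PySem.Str.pyGet? str k).elim false PySem.Chars.isupper then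
      PySem.Str.slice str (some k) (some (k + 2))
    else
      -- str[k]: index known in range by the guard
      (PySem.Str.pyGet? str k).elim "" (fun c => String.ofList [c])

-- ===== PORT B =====
-- Source B's forward 'while True' scan: the index i becomes the suffix cs.drop i and k becomes k - i.
def pointNewCharAltLoop (l : List Char) (k : Int) : String :=
  match l with
  | [] => ""   -- unreachable for inputs passing the guard; keeps the recursion total
  | c :: rest =>
    if PySem.Chars.isupper c then
      if k ≤ 1 then String.ofList ((c :: rest).take 2)   -- str[i:i+2]
      else pointNewCharAltLoop (rest.drop 1) (k - 2)
    else
      if k = 0 then String.ofList [c]                    -- str[i]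
      else pointNewCharAltLoop rest (k - 1)
termination_by l.length
decreasing_by all_goals simp

def pointNewChar_alt (str : String) (k : Int) : String :=
  if str = "" ∨ k < 0 ∨ k ≥ PySem.Str.len str then ""
  else pointNewCharAltLoop str.toList k

-- ===== PRECONDITION & SPEC =====
def Spec_pointNewChar (str : String) (k : Int) (out : String) : Prop := out = pointNewChar_alt str k
instance (str : String) (k : Int) (out : String) : Decidable (Spec_pointNewChar str k out) := by unfold Spec_pointNewChar; infer_instance

-- ===== CLAIM (what is proved, stated in full; the proofs are below) =====
def Claim_equal_pointNewChar : Prop := ∀ (str : String) (k : Int), Dom_pointNewChar str k → Spec_pointNewChar str k (pointNewChar str k)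

-- ===== LEMMAS AND PROOFS =====

-- pvU cs j = length of the maximal run of uppercase characters ending just below index j.
def pvU (cs : List Char) : Nat → Nat
  | 0 => 0
  | j + 1 => if PySem.Chars.isupper ((cs[j]?.getD ' ')) then pvU cs j + 1 else 0

-- the common value both programs compute, expressed through pvU
def pvTarget (cs : List Char) (n : Nat) : String :=
  if pvU cs n % 2 = 1 then String.ofList ((cs.drop (n - 1)).take 2)
  else if PySem.Chars.isupper ((cs[n]?.getD ' ')) then String.ofList ((cs.drop n).take 2)
  else String.ofList [(cs[n]?.getD ' ')]

theorem pvRange_desc_zero : PySem.List.pyRange ((0 : Int) - 1) (-1) (-1) = [] := by decide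

theorem pvRange_desc_succ (m : Nat) :
    PySem.List.pyRange ((↑(m + 1) : Int) - 1) (-1) (-1)
      = (↑m : Int) :: PySem.List.pyRange ((↑m : Int) - 1) (-1) (-1) := by
  simp only [PySem.List.pyRange]
  norm_num
  rw [if_pos (by omega : (-1 : Int) < ↑m)]
  have h2 : (if 0 < m then m else 0) = m := by split <;> omega
  rw [h2, List.range_succ_eq_map, List.map_cons, List.map_map]
  norm_num
  intro a _; ring

theorem pvFold_broken (f : Int × Bool → Int → Int × Bool)
    (hf : ∀ st i, st.2 = true → f st i = st) (l : List Int) (c : Int) :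
    l.foldl f (c, true) = (c, true) := by
  induction l generalizing c with
  | nil => rfl
  | cons x xs ih => simpa [List.foldl, hf (c, true) x rfl] using ih c

theorem pvGet_elim (str : String) (m : Nat) (hm : m < str.toList.length) :
    (PySem.Str.pyGet? str (↑m : Int)).elim false PySem.Chars.isupper
      = PySem.Chars.isupper ((str.toList[m]?.getD ' ')) := by
  simp [List.getElem?_eq_getElem hm]

theorem pvFold_count (str : String) (m : Nat) (hm : m ≤ str.toList.length) (c : Int) :
    ((PySem.List.pyRange ((↑m : Int) - 1) (-1) (-1)).foldl
      (fun (st : Int × Bool) i =>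
        if st.2 then st
        else if ¬ ((PySem.Str.pyGet? str i).elim false PySem.Chars.isupper) then (st.1, true)
        else (st.1 + 1, st.2)) (c, false)).1 = c + ↑(pvU str.toList m) := by
  induction m generalizing c with
  | zero =>
    rw [show ((0 : Nat) : Int) = (0 : Int) from rfl, pvRange_desc_zero]
    simp [pvU]
  | succ m ih =>
    rw [pvRange_desc_succ m]
    simp only [List.foldl_cons]
    rw [show ((if (false : Bool) then ((c : Int), false)
        else if ¬ ((PySem.Str.pyGet? str (↑m : Int)).elim false PySem.Chars.isupper) then (c, true)
        else (c + 1, false)) )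
      = (if ¬ ((PySem.Str.pyGet? str (↑m : Int)).elim false PySem.Chars.isupper) then (c, true)
        else (c + 1, false)) from by simp]
    rw [pvGet_elim str m (by omega)]
    by_cases hu : PySem.Chars.isupper ((str.toList[m]?.getD ' '))
    · rw [if_neg (by simp [hu])]
      rw [ih (by omega) (c + 1)]
      rw [show pvU str.toList (m + 1) = pvU str.toList m + 1 from by simp [pvU, hu]]
      push_cast; ring
    · rw [if_pos (by simp [hu])]
      rw [pvFold_broken _ (by intro st i h; simp [h]) _ c]
      rw [show pvU str.toList (m + 1) = 0 from by simp [pvU, hu]]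
      simp

theorem pvLoop_target (cs : List Char) (n : Nat) (hn : n < cs.length)
    (d : Nat) (i : Nat) (hd : n - i = d) (hi : i ≤ n) (he : pvU cs i % 2 = 0) :
    pointNewCharAltLoop (cs.drop i) ((↑n : Int) - ↑i) = pvTarget cs n := by
  induction d using Nat.strong_induction_on generalizing i with
  | _ d ih =>
  have hilen : i < cs.length := by omega
  rw [List.drop_eq_getElem_cons hilen, pointNewCharAltLoop]
  have hgd : cs[i] = (cs[i]?.getD ' ') := by
    simp [List.getElem?_eq_getElem hilen]
  by_cases hu : PySem.Chars.isupper ((cs[i]?.getD ' '))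
  · rw [if_pos (by rw [hgd]; exact hu)]
    by_cases hk : ((↑n : Int) - ↑i ≤ 1)
    · rw [if_pos hk]
      have : n = i ∨ n = i + 1 := by omega
      rcases this with h | h
      · subst h
        unfold pvTarget
        rw [if_neg (by omega), if_pos hu, ← List.drop_eq_getElem_cons hilen]
      · subst h
        unfold pvTarget
        have : pvU cs (i + 1) = pvU cs i + 1 := by
          show (if PySem.Chars.isupper ((cs[i]?.getD ' ')) then pvU cs i + 1 else 0) = pvU cs i + 1
          rw [if_pos hu]
        rw [if_pos (by omega), show i + 1 - 1 = i from rfl, ← List.drop_eq_getElem_cons hilen]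
    · rw [if_neg hk]
      have h2 : i + 2 ≤ n := by omega
      have hdrop : (cs.drop (i + 1)).drop 1 = cs.drop (i + 2) := by
        rw [List.drop_drop]
      have harg : (↑n : Int) - ↑i - 2 = (↑n : Int) - ↑(i + 2) := by push_cast; ring
      rw [hdrop, harg]
      have he2 : pvU cs (i + 2) % 2 = 0 := by
        show (if PySem.Chars.isupper ((cs[i+1]?.getD ' ')) then pvU cs (i+1) + 1 else 0) % 2 = 0
        by_cases hu1 : PySem.Chars.isupper ((cs[i+1]?.getD ' '))
        · rw [if_pos hu1, show pvU cs (i + 1) = pvU cs i + 1 from by simp [pvU, hu]]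
          omega
        · rw [if_neg hu1]
      exact ih (n - (i + 2)) (by omega) (i + 2) rfl (by omega) he2
  · rw [if_neg (by rw [hgd]; exact hu)]
    by_cases hk : ((↑n : Int) - ↑i = 0)
    · rw [if_pos hk]
      have h : n = i := by omega
      subst h
      unfold pvTarget
      rw [if_neg (by omega), if_neg hu, hgd]
    · rw [if_neg hk]
      have harg : (↑n : Int) - ↑i - 1 = (↑n : Int) - ↑(i + 1) := by push_cast; ring
      rw [harg]
      have he1 : pvU cs (i + 1) % 2 = 0 := by
        show (if PySem.Chars.isupper ((cs[i]?.getD ' ')) then pvU cs i + 1 else 0) % 2 = 0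
        rw [if_neg hu]
      exact ih (n - (i + 1)) (by omega) (i + 1) rfl (by omega) he1

theorem pvA_target (str : String) (n : Nat) (hn : n < str.toList.length) :
    pointNewChar str (↑n) = pvTarget str.toList n := by
  have hne : str ≠ "" := by
    intro h; subst h; simp at hn
  have hlen : PySem.Str.len str = str.toList.length := PySem.Str.len_eq str
  unfold pointNewChar
  rw [if_neg (by push Not; refine ⟨hne, by omega, by omega⟩)]
  simp only
  rw [pvFold_count str n (by omega) 0]
  have hband : PySem.Int.band (0 + ↑(pvU str.toList n)) 1 = ↑(pvU str.toList n % 2) := by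
    rw [zero_add, show (1 : Int) = ((1 : Nat) : Int) from rfl, PySem.Int.band_natCast,
        Nat.and_one_is_mod]
  rw [hband]
  unfold pvTarget
  by_cases hodd : pvU str.toList n % 2 = 1
  · rw [if_pos (by exact_mod_cast hodd), if_pos hodd]
    have hn1 : 1 ≤ n := by
      by_contra h
      have : n = 0 := by omega
      subst this
      simp [pvU] at hodd
    apply String.ext
    rw [PySem.Str.toList_slice]
    have h1 : (↑n : Int) - 1 = ((n - 1 : Nat) : Int) := by omega
    have h2 : (↑n : Int) + 1 = ((n + 1 : Nat) : Int) := by omega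
    rw [h1, h2]
    simp only [PySem.Chars.slice_eq_listSlice, PySem.List.slice_natCast]
    rw [String.toList_ofList]
    congr 1
    omega
  · rw [if_neg (by exact_mod_cast hodd), if_neg hodd]
    rw [pvGet_elim str n hn]
    by_cases hu : PySem.Chars.isupper ((str.toList[n]?.getD ' '))
    · rw [if_pos hu, if_pos hu]
      apply String.ext
      rw [PySem.Str.toList_slice]
      have h2 : (↑n : Int) + 2 = ((n + 2 : Nat) : Int) := by omega
      rw [h2]
      simp only [PySem.Chars.slice_eq_listSlice, PySem.List.slice_natCast]
      rw [String.toList_ofList]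
      congr 1
      omega
    · rw [if_neg hu, if_neg hu]
      rw [show PySem.Str.pyGet? str (↑n : Int) = some ((str.toList[n]?.getD ' ')) from by
        simp [List.getElem?_eq_getElem hn]]
      rfl

-- ===== VERDICT (by name: the statement is the Claim_ definition above) =====
theorem pointNewChar_spec : Claim_equal_pointNewChar := by
  intro str k _
  unfold Spec_pointNewChar pointNewChar_alt
  by_cases hg : str = "" ∨ k < 0 ∨ k ≥ PySem.Str.len str
  · simp only [pointNewChar, if_pos hg]
  · rw [if_neg hg]
    push Not at hg
    obtain ⟨hne, hk0, hklen⟩ := hg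
    have hlen : PySem.Str.len str = str.toList.length := PySem.Str.len_eq str
    have hk : k = (↑k.toNat : Int) := (Int.toNat_of_nonneg hk0).symm
    have hnlt : k.toNat < str.toList.length := by rw [hlen] at hklen; omega
    rw [hk, pvA_target str k.toNat hnlt]
    have := pvLoop_target str.toList k.toNat hnlt k.toNat 0 (by omega) (by omega) (by simp [pvU])
    simpa using this.symm
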